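-- pv_equiv track=rewrite | github.com/tomonorman/customwarp-turtle | warp-client/artefacts/parameters.py | iter_grid
-- ===== SOURCE A (Python) =====
-- from itertools import product
-- from typing import Iterable
--
-- def iter_grid(grid_spec: dict) -> Iterable[dict]:
--     """Iterate over the points defined by the `grid_spec`"""
--     if not grid_spec:
--         yield {}
--     else:
--         # Sort the keys of the dictionary, for reproducibility
--         items = sorted(grid_spec.items())
--         keys, values = zip(*items)
--         # Make sure single values are converted to lists
--         values = [x if type(x) == list else [x] for x in values]
--         for v in product(*values):
--             params = dict(zip(keys, v))
--             yield params
-- ===== SOURCE B (Python) =====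
-- def iter_grid(grid_spec: dict):
--     """Iterate over the points defined by the `grid_spec`"""
--     if not grid_spec:
--         yield {}
--         return
--     # Build the Cartesian product iteratively: each step extends every
--     # partial assignment with every value of the current (sorted) key.
--     acc = [{}]
--     for key, values in sorted(grid_spec.items()):
--         if type(values) != list:
--             values = [values]
--         acc = [{**partial, key: v} for partial in acc for v in values]
--     yield from acc
-- ===== Notes on version B (the rewrite author's own statement) =====
-- stated objective: alternative
-- what changed: Replaces the itertools.product call with an iterative accumulator that starts from a single empty partial assignment and, for each sorted key, extends every partial assignment with every value of that key, yielding the finished dicts.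
import Mathlib
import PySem

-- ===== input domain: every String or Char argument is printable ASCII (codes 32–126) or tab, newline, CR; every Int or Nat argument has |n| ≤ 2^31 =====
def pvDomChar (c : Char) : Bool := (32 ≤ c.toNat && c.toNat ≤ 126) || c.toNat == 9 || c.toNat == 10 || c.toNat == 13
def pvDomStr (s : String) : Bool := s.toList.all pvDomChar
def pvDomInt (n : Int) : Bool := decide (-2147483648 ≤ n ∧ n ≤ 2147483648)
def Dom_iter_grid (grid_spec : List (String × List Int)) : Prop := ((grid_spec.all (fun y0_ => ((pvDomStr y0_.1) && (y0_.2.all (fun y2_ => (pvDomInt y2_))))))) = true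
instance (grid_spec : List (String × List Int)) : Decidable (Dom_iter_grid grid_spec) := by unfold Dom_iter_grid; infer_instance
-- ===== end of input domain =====

-- B replaces itertools.product by an iterative accumulator that extends each partial
-- assignment with every value of the current key (objective: alternative decomposition,
-- same cost). Both are generators; equivalence is about the sequence of yielded dicts.

-- ===== PORT A =====
-- itertools.product(*values), last factor varying fastest (exact CPython order)
def pyProduct : List (List Int) → List (List Int)
  | [] => [[]]
  | vs :: rest => vs.flatMap (fun v => (pyProduct rest).map (v :: ·))

-- The Python argument is a dict; the assoc-list argument is read as that dict (later
-- duplicates overwrite, insertion order), exactly dict(grid_spec).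
-- The 'x if type(x)==list else [x]' coercion is the identity here: every value is a list.
def iter_grid (grid_spec : List (String × List Int)) : List (List (String × Int)) :=
  if grid_spec = [] then [[]]
  else
    let items := PySem.List.sorted (PySem.Dict.ofList grid_spec).items (fun p => p.1) false
    let keys := items.map Prod.fst
    let values := items.map Prod.snd
    (pyProduct values).map (fun v => keys.zip v)

-- ===== PORT B =====
def iter_grid_alt (grid_spec : List (String × List Int)) : List (List (String × Int)) :=
  if grid_spec = [] then [[]]
  else
    let items := PySem.List.sorted (PySem.Dict.ofList grid_spec).items (fun p => p.1) false
    (items.foldl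
      (fun acc kv => acc.flatMap (fun p => kv.2.map (fun v => p.insert kv.1 v)))
      ([PySem.Dict.empty] : List (PySem.Dict String Int))).map (·.items)

-- ===== PRECONDITION & SPEC =====
def Spec_iter_grid (grid_spec : List (String × List Int)) (out : List (List (String × Int))) : Prop := out = iter_grid_alt grid_spec
instance (grid_spec : List (String × List Int)) (out : List (List (String × Int))) : Decidable (Spec_iter_grid grid_spec out) := by unfold Spec_iter_grid; infer_instance

-- ===== CLAIM (what is proved, stated in full; the proofs are below) =====
def Claim_equal_iter_grid : Prop := ∀ (grid_spec : List (String × List Int)), Dom_iter_grid grid_spec → Spec_iter_grid grid_spec (iter_grid grid_spec)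

-- ===== LEMMAS AND PROOFS =====

-- B's accumulator loop over items with pairwise-distinct, fresh keys computes,
-- for each starting dict, its items followed by keys-zip-tuple for each product tuple.
lemma foldl_extend_eq_product (items : List (String × List Int))
    (acc : List (PySem.Dict String Int))
    (hnd : (items.map Prod.fst).Nodup)
    (hfresh : ∀ d ∈ acc, ∀ k ∈ items.map Prod.fst, d.contains k = false) :
    (items.foldl
      (fun acc kv => acc.flatMap (fun p => kv.2.map (fun v => p.insert kv.1 v)))
      acc).map (·.items)
    = acc.flatMap (fun d =>
        (pyProduct (items.map Prod.snd)).map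
          (fun t => d.items ++ (items.map Prod.fst).zip t)) := by
  induction items generalizing acc with
  | nil =>
    induction acc with
    | nil => rfl
    | cons h t iha => simp_all [pyProduct]
  | cons kv rest ih =>
    obtain ⟨k, vs⟩ := kv
    simp only [List.map_cons] at hnd hfresh
    have hk : k ∉ rest.map Prod.fst := (List.nodup_cons.mp hnd).1
    have hndr : (rest.map Prod.fst).Nodup := (List.nodup_cons.mp hnd).2
    simp only [List.foldl_cons]
    rw [ih _ hndr ?_]
    · -- both sides are flatMaps over acc; rewrite pointwise using freshness of k
      rw [List.flatMap_assoc]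
      apply List.flatMap_congr
      intro d hd
      have hdk : d.contains k = false := hfresh d hd k (List.mem_cons_self)
      simp only [pyProduct, List.map_cons, List.flatMap_map, List.map_flatMap]
      apply List.flatMap_congr
      intro v _
      rw [PySem.Dict.items_insert_of_not_contains _ _ hdk]
      simp [List.map_map, Function.comp, List.append_assoc]
    · -- freshness is preserved: inserted key k is not among rest's keys
      intro d' hd' k' hk'
      simp only [List.mem_flatMap, List.mem_map] at hd'
      obtain ⟨d, hd, v, _, rfl⟩ := hd'
      rw [PySem.Dict.contains_insert]
      have hne : (k' == k) = false := by
        simp only [beq_eq_false_iff_ne]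
        rintro rfl; exact hk hk'
      simp [hne, hfresh d hd k' (List.mem_cons_of_mem _ hk')]

-- ===== VERDICT (by name: the statement is the Claim_ definition above) =====
theorem iter_grid_spec : Claim_equal_iter_grid := by
  intro grid_spec _
  unfold Spec_iter_grid iter_grid iter_grid_alt
  by_cases hnil : grid_spec = []
  · simp [hnil]
  · simp only [hnil, if_false]
    set items := PySem.List.sorted (PySem.Dict.ofList grid_spec).items (fun p => p.1) false with hitems
    have hnd : (items.map Prod.fst).Nodup := by
      have hperm : items.Perm (PySem.Dict.ofList grid_spec).items :=
        PySem.List.sorted_perm _ _ _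
      exact (hperm.map Prod.fst).nodup_iff.mpr
        (PySem.Dict.nodup_keys_ofList grid_spec)
    rw [foldl_extend_eq_product items [PySem.Dict.empty] hnd ?_]
    · simp [PySem.Dict.empty]
    · intro d hd k _
      simp only [List.mem_singleton] at hd
      subst hd
      exact PySem.Dict.contains_empty k
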